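-- pv_equiv track=rewrite | github.com/SunnyChopper/nanobot-ui | nanobot/agent/computer_use/repetition.py | last_same_kind_streak
-- ===== SOURCE A (Python) =====
-- from typing import Any
--
-- def last_same_kind_streak(actions: list[dict[str, Any]]) -> tuple[int, str | None]:
--     """Return (count, kind) for how many of the last actions share the same kind (0 = empty list)."""
--     if not actions:
--         return 0, None
--     last_kind = (actions[-1].get("kind") or "").strip()
--     if not last_kind:
--         return 0, None
--     count = 1
--     for i in range(len(actions) - 2, -1, -1):
--         if (actions[i].get("kind") or "").strip() == last_kind:
--             count += 1
--         else:
--             break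
--     return count, last_kind
-- ===== SOURCE B (Python) =====
-- def last_same_kind_streak(actions):
--     """Forward single pass tracking the current run (kind, length); read off the final run."""
--     if not actions:
--         return 0, None
--     cur, n = None, 0
--     for a in actions:
--         k = (a.get("kind") or "").strip()
--         if cur == k:
--             n += 1
--         else:
--             cur, n = k, 1
--     if not cur:
--         return 0, None
--     return n, cur
-- ===== Notes on version B (the rewrite author's own statement) =====
-- stated objective: alternative
-- what changed: Replaces A's backward index scan with early break by a single forward fold that maintains the current run's (kind, length) and then reads off the final run.
import Mathlib
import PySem

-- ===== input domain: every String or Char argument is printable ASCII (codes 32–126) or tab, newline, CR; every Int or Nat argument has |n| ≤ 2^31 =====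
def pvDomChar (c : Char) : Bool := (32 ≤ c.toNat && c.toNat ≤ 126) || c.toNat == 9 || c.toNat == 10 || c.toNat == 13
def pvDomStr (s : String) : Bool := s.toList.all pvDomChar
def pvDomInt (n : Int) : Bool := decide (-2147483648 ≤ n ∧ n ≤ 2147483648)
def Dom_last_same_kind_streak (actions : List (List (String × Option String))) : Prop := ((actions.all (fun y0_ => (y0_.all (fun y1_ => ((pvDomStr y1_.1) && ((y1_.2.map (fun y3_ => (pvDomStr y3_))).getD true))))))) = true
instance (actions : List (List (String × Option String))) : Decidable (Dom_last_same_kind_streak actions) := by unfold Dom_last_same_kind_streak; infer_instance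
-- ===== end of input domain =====

-- B replaces A's backward index scan (with break) by a single forward fold over the runs; alternative decomposition, same cost.

-- ===== PORT A =====
-- (actions[i].get("kind") or "").strip()
def pvKindA (d : List (String × Option String)) : String :=
  PySem.Str.strip (((PySem.Dict.mk d).get? "kind").join.getD "")

-- the backward loop: pvLoopA actions lk r scans indices r-1, r-2, …, 0, counting matches until the break
def pvLoopA (actions : List (List (String × Option String))) (lk : String) : Nat → Int
  | 0 => 0
  | r + 1 =>
    if pvKindA (PySem.List.pyGetD actions (r : Int) []) = lk then 1 + pvLoopA actions lk r else 0

def last_same_kind_streak (actions : List (List (String × Option String))) : Int × Option String :=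
  if actions = [] then (0, none)
  else
    let lastKind := pvKindA (PySem.List.pyGetD actions (-1) [])
    if lastKind = "" then (0, none)
    else (1 + pvLoopA actions lastKind (actions.length - 1), some lastKind)

-- ===== PORT B =====
def pvKindB (a : List (String × Option String)) : String :=
  match (PySem.Dict.mk a).get? "kind" with
  | some (some s) => PySem.Str.strip s
  | _ => ""

def last_same_kind_streak_alt (actions : List (List (String × Option String))) : Int × Option String :=
  match actions with
  | [] => (0, none)
  | _ :: _ =>
    let acc := actions.foldl
      (fun (acc : Option String × Int) a =>
        let k := pvKindB a
        if acc.1 = some k then (acc.1, acc.2 + 1) else (some k, 1)) (none, 0)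
    match acc.1 with
    | some c => if c = "" then (0, none) else (acc.2, some c)
    | none => (0, none)

-- ===== PRECONDITION & SPEC =====
def Spec_last_same_kind_streak (actions : List (List (String × Option String))) (out : Int × Option String) : Prop := out = last_same_kind_streak_alt actions
instance (actions : List (List (String × Option String))) (out : Int × Option String) : Decidable (Spec_last_same_kind_streak actions out) := by unfold Spec_last_same_kind_streak; infer_instance

-- ===== CLAIM (what is proved, stated in full; the proofs are below) =====
def Claim_equal_last_same_kind_streak : Prop := ∀ (actions : List (List (String × Option String))), Dom_last_same_kind_streak actions → Spec_last_same_kind_streak actions (last_same_kind_streak actions)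

-- ===== LEMMAS AND PROOFS =====

-- length of the constant prefix equal to k
def pvPfx : List String → String → Int
  | [], _ => 0
  | x :: t, k => if x = k then 1 + pvPfx t k else 0

theorem pvKind_eq (a : List (String × Option String)) : pvKindB a = pvKindA a := by
  unfold pvKindA pvKindB
  rcases h : (PySem.Dict.mk a).get? "kind" with _ | (_ | s) <;> simp [PySem.Str.strip] <;> decide

theorem pvFoldB (ks : List String) (k : String) :
    (ks ++ [k]).foldl
      (fun (acc : Option String × Int) x =>
        if acc.1 = some x then (acc.1, acc.2 + 1) else (some x, 1)) (none, 0)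
    = (some k, pvPfx ((ks ++ [k]).reverse) k) := by
  induction ks using List.reverseRecOn generalizing k with
  | nil => simp [pvPfx]
  | append_singleton t k' ih =>
    rw [List.append_assoc, List.singleton_append, List.foldl_append]
    have ih' := ih k'
    rw [List.foldl_append] at ih'
    simp only [List.foldl_cons, List.foldl_nil] at ih' ⊢
    rw [ih']
    by_cases hk : k' = k
    · subst hk
      simp [pvPfx, List.reverse_append, add_comm]
    · have : ¬ (some k' = some k) := by simpa using hk
      simp [this, pvPfx, List.reverse_append, hk]

theorem pvLoopA_eq (actions : List (List (String × Option String))) (lk : String) :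
    ∀ r, r ≤ actions.length →
      pvLoopA actions lk r = pvPfx (((actions.take r).map pvKindA).reverse) lk := by
  intro r
  induction r with
  | zero => intro _; simp [pvLoopA, pvPfx]
  | succ r ih =>
    intro hr
    have hrlt : r < actions.length := by omega
    have htake : actions.take (r + 1) = actions.take r ++ [actions[r]] :=
      List.take_succ_eq_append_getElem hrlt
    rw [pvLoopA, ih (by omega), htake]
    have hget : PySem.List.pyGetD actions (r : Int) [] = actions[r] := by
      rw [PySem.List.pyGetD_natCast, List.getD_eq_getElem _ _ hrlt]
    rw [hget]
    simp only [List.map_append, List.map_cons, List.map_nil, List.reverse_append,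
      List.reverse_cons, List.reverse_nil, List.nil_append, List.cons_append]
    by_cases h : pvKindA actions[r] = lk <;> simp [pvPfx, h, add_comm]

-- ===== VERDICT (by name: the statement is the Claim_ definition above) =====
theorem last_same_kind_streak_spec : Claim_equal_last_same_kind_streak := by
  intro actions _
  unfold Spec_last_same_kind_streak
  induction actions using List.reverseRecOn with
  | nil => rfl
  | append_singleton init a _ =>
    have hne : init ++ [a] ≠ [] := by simp
    have hlk : pvKindA (PySem.List.pyGetD (init ++ [a]) (-1) []) = pvKindA a := by
      rw [PySem.List.pyGetD_neg_one_append_singleton]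
    -- evaluate B
    have hmapB : (init ++ [a]).map pvKindB = init.map pvKindA ++ [pvKindA a] := by
      simp [List.map_append, List.map_congr_left fun x _ => pvKind_eq x]
    have hfold :
        (init ++ [a]).foldl
          (fun (acc : Option String × Int) x =>
            let k := pvKindB x
            if acc.1 = some k then (acc.1, acc.2 + 1) else (some k, 1)) (none, 0)
        = (some (pvKindA a),
            pvPfx ((init.map pvKindA ++ [pvKindA a]).reverse) (pvKindA a)) := by
      have := pvFoldB (init.map pvKindA) (pvKindA a)
      calc (init ++ [a]).foldl
            (fun (acc : Option String × Int) x =>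
              let k := pvKindB x
              if acc.1 = some k then (acc.1, acc.2 + 1) else (some k, 1)) (none, 0)
          = ((init ++ [a]).map pvKindB).foldl
              (fun (acc : Option String × Int) x =>
                if acc.1 = some x then (acc.1, acc.2 + 1) else (some x, 1)) (none, 0) := by
            rw [List.foldl_map]
        _ = _ := by rw [hmapB, this]
    rcases hinit : init ++ [a] with _ | ⟨b, t⟩
    · exact absurd hinit hne
    · rw [← hinit]
      show last_same_kind_streak (init ++ [a]) = last_same_kind_streak_alt (init ++ [a])
      unfold last_same_kind_streak last_same_kind_streak_alt
      rw [hinit]; rw [← hinit]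
      simp only [hne, if_false, hfold, hlk]
      by_cases hempty : pvKindA a = ""
      · simp [hempty]
        rw [hinit]
      · have hlen : (init ++ [a]).length - 1 = init.length := by simp
        have htake : (init ++ [a]).take init.length = init := by simp
        rw [hlen, pvLoopA_eq _ _ init.length (by simp), htake]
        simp only [hempty, if_false, List.reverse_append, List.reverse_cons,
          List.reverse_nil, List.nil_append, List.singleton_append]
        simp [pvPfx, add_comm]
        rw [hinit]
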